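-- pv_equiv track=rewrite | github.com/wellqin/USTC | leetcode/editor/cn/[1018]可被 5 整除的二进制前缀.py | prefixesDivBy51
-- ===== SOURCE A (Python) =====
-- def prefixesDivBy51(A):
--     res = []
--     num = 0
--     for i in range(len(A)):
--         num = (num*2 + A[i]) % 10  # 对每一步取余数
--         if num % 5 == 0:
--             res.append(True)
--         else:
--             res.append(False)
--     return res
-- ===== SOURCE B (Python) =====
-- def prefixesDivBy51(A):
--     # Positional-weight algorithm: since 2**4 == 16 == 1 (mod 5), the weight
--     # 2**(i-j) mod 5 of element j in prefix i depends only on (i - j) % 4.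
--     # Keep, per index class r = j % 4, the running sum of elements (mod 5);
--     # the i-th prefix value mod 5 is the weighted sum of the four buckets
--     # with weights POW[(i - r) % 4].
--     POW = (1, 2, 4, 3)
--     s = [0, 0, 0, 0]
--     res = []
--     for i, a in enumerate(A):
--         s[i % 4] = (s[i % 4] + a) % 5
--         v = (s[0] * POW[(i - 0) % 4] + s[1] * POW[(i - 1) % 4]
--              + s[2] * POW[(i - 2) % 4] + s[3] * POW[(i - 3) % 4]) % 5
--         res.append(v == 0)
--     return res
-- ===== Notes on version B (the rewrite author's own statement) =====
-- stated objective: alternative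
-- what changed: B replaces A's running-remainder recurrence with a positional-weight algorithm: because 2^4 = 1 (mod 5), it maintains four bucketed sums of elements by index class mod 4 and evaluates each prefix mod 5 as a weighted sum of the buckets with the cyclic weights of the powers of two mod 5.
import Mathlib
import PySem

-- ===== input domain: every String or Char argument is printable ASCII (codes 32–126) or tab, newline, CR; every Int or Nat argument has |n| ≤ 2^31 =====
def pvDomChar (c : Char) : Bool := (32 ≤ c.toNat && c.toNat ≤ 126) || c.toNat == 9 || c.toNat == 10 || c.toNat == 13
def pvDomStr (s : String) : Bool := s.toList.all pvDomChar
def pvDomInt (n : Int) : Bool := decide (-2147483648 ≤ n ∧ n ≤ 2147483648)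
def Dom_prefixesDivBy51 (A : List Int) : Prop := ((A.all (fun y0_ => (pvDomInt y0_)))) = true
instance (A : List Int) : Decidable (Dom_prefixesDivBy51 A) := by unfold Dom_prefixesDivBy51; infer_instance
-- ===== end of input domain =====

-- B is an alternative algorithm: using 2^4 = 1 (mod 5) it keeps four bucketed sums of elements
-- by index class mod 4 and evaluates each prefix mod 5 as a weighted sum with the cyclic weights of the powers of two mod 5,
-- instead of A's running-remainder recurrence.


-- ===== PORT A =====
-- loop 'for i in range(len(A))' over (res, num); A[i] via pyGetD (index always valid, so exact)
def prefixesDivBy51 (A : List Int) : List Bool :=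
  (((PySem.List.pyRange 0 (PySem.List.len A) 1).foldl
      (fun (s : List Bool × Int) i =>
        let num := PySem.Int.mod (s.2 * 2 + PySem.List.pyGetD A i 0) 10
        if PySem.Int.mod num 5 = 0 then (s.1 ++ [true], num) else (s.1 ++ [false], num))
      ([], 0))).1

-- ===== PORT B =====
-- 'for i, a in enumerate(A)' as structural recursion over the list carrying the index i and the
-- four buckets s0..s3; the in-place update 's[i % 4] = (s[i % 4] + a) % 5' becomes the four
-- guarded bucket updates; POW[(i - r) % 4] is a tuple fetch, ported via pyGetD on [1,2,4,3]
def pvAltGo (xs : List Int) (i s0 s1 s2 s3 : Int) : List Bool :=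
  match xs with
  | [] => []
  | a :: t =>
    let r := PySem.Int.mod i 4
    let s0' := if r = 0 then PySem.Int.mod (s0 + a) 5 else s0
    let s1' := if r = 1 then PySem.Int.mod (s1 + a) 5 else s1
    let s2' := if r = 2 then PySem.Int.mod (s2 + a) 5 else s2
    let s3' := if r = 3 then PySem.Int.mod (s3 + a) 5 else s3
    let v := PySem.Int.mod
      (s0' * PySem.List.pyGetD [1, 2, 4, 3] (PySem.Int.mod (i - 0) 4) 0
        + s1' * PySem.List.pyGetD [1, 2, 4, 3] (PySem.Int.mod (i - 1) 4) 0
        + s2' * PySem.List.pyGetD [1, 2, 4, 3] (PySem.Int.mod (i - 2) 4) 0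
        + s3' * PySem.List.pyGetD [1, 2, 4, 3] (PySem.Int.mod (i - 3) 4) 0) 5
    decide (v = 0) :: pvAltGo t (i + 1) s0' s1' s2' s3'

def prefixesDivBy51_alt (A : List Int) : List Bool := pvAltGo A 0 0 0 0 0

-- ===== PRECONDITION & SPEC =====
def Spec_prefixesDivBy51 (A : List Int) (out : List Bool) : Prop := out = prefixesDivBy51_alt A
instance (A : List Int) (out : List Bool) : Decidable (Spec_prefixesDivBy51 A out) := by unfold Spec_prefixesDivBy51; infer_instance

-- ===== CLAIM (what is proved, stated in full; the proofs are below) =====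
def Claim_equal_prefixesDivBy51 : Prop := ∀ (A : List Int), Dom_prefixesDivBy51 A → Spec_prefixesDivBy51 A (prefixesDivBy51 A)

-- ===== LEMMAS AND PROOFS =====

-- A's loop body as a named step function
def pvStepA (s : List Bool × Int) (a : Int) : List Bool × Int :=
  let num := PySem.Int.mod (s.2 * 2 + a) 10
  if PySem.Int.mod num 5 = 0 then (s.1 ++ [true], num) else (s.1 ++ [false], num)

theorem pvA_eq_foldl (A : List Int) :
    prefixesDivBy51 A = (A.foldl pvStepA ([], 0)).1 := by
  unfold prefixesDivBy51
  rw [PySem.List.len_eq, show (fun (s : List Bool × Int) (i : Int) =>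
        let num := PySem.Int.mod (s.2 * 2 + PySem.List.pyGetD A i 0) 10
        if PySem.Int.mod num 5 = 0 then (s.1 ++ [true], num) else (s.1 ++ [false], num))
      = (fun s i => pvStepA s (PySem.List.pyGetD A i 0)) from rfl,
    PySem.List.foldl_pyRange_zero_pyGetD' A 0 pvStepA ([], 0)]

-- A's step in closed form
theorem pvStepA_eq (resA : List Bool) (num a : Int) :
    pvStepA (resA, num) a
      = (resA ++ [decide ((num * 2 + a) % 10 % 5 = 0)], (num * 2 + a) % 10) := by
  unfold pvStepA
  simp only [PySem.Int.mod_eq_emod_of_pos (show (0:Int) < 10 by norm_num),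
    PySem.Int.mod_eq_emod_of_pos (show (0:Int) < 5 by norm_num)]
  by_cases h : (5:Int) ∣ (num * 2 + a) <;> simp [h]

-- the simultaneous induction: if the bucket-weighted sum agrees with 2*num mod 5,
-- A's remaining fold output equals resA followed by B's remaining recursion output
theorem pvMain (xs : List Int) :
    ∀ (i s0 s1 s2 s3 num : Int) (resA : List Bool),
      (s0 * PySem.List.pyGetD [1, 2, 4, 3] (PySem.Int.mod (i - 0) 4) 0
        + s1 * PySem.List.pyGetD [1, 2, 4, 3] (PySem.Int.mod (i - 1) 4) 0
        + s2 * PySem.List.pyGetD [1, 2, 4, 3] (PySem.Int.mod (i - 2) 4) 0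
        + s3 * PySem.List.pyGetD [1, 2, 4, 3] (PySem.Int.mod (i - 3) 4) 0) % 5
        = (2 * num) % 5 →
      (xs.foldl pvStepA (resA, num)).1 = resA ++ pvAltGo xs i s0 s1 s2 s3 := by
  induction xs with
  | nil => intro i s0 s1 s2 s3 num resA _; simp [pvAltGo]
  | cons a t ih =>
    intro i s0 s1 s2 s3 num resA hinv
    have g0 : PySem.List.pyGetD [(1:Int), 2, 4, 3] 0 0 = 1 := by decide
    have g1 : PySem.List.pyGetD [(1:Int), 2, 4, 3] 1 0 = 2 := by decide
    have g2 : PySem.List.pyGetD [(1:Int), 2, 4, 3] 2 0 = 4 := by decide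
    have g3 : PySem.List.pyGetD [(1:Int), 2, 4, 3] 3 0 = 3 := by decide
    rcases (show i % 4 = 0 ∨ i % 4 = 1 ∨ i % 4 = 2 ∨ i % 4 = 3 by omega) with h | h | h | h
    · have hm : PySem.Int.mod i 4 = 0 := by
        rw [PySem.Int.mod_eq_emod_of_pos (show (0:Int) < 4 by norm_num)]; omega
      have e0 : PySem.Int.mod (i - 0) 4 = 0 := by
        rw [PySem.Int.mod_eq_emod_of_pos (show (0:Int) < 4 by norm_num)]; omega
      have e1 : PySem.Int.mod (i - 1) 4 = 3 := by
        rw [PySem.Int.mod_eq_emod_of_pos (show (0:Int) < 4 by norm_num)]; omega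
      have e2 : PySem.Int.mod (i - 2) 4 = 2 := by
        rw [PySem.Int.mod_eq_emod_of_pos (show (0:Int) < 4 by norm_num)]; omega
      have e3 : PySem.Int.mod (i - 3) 4 = 1 := by
        rw [PySem.Int.mod_eq_emod_of_pos (show (0:Int) < 4 by norm_num)]; omega
      have f0 : PySem.Int.mod (i + 1 - 0) 4 = 1 := by
        rw [PySem.Int.mod_eq_emod_of_pos (show (0:Int) < 4 by norm_num)]; omega
      have f1 : PySem.Int.mod (i + 1 - 1) 4 = 0 := by
        rw [PySem.Int.mod_eq_emod_of_pos (show (0:Int) < 4 by norm_num)]; omega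
      have f2 : PySem.Int.mod (i + 1 - 2) 4 = 3 := by
        rw [PySem.Int.mod_eq_emod_of_pos (show (0:Int) < 4 by norm_num)]; omega
      have f3 : PySem.Int.mod (i + 1 - 3) 4 = 2 := by
        rw [PySem.Int.mod_eq_emod_of_pos (show (0:Int) < 4 by norm_num)]; omega
      simp only [e0, e1, e2, e3, g0, g1, g2, g3] at hinv
      rw [List.foldl_cons, pvStepA_eq]
      simp only [pvAltGo, hm, e0, e1, e2, e3, g0, g1, g2, g3, reduceIte, Int.reduceEq,
        PySem.Int.mod_eq_emod_of_pos (show (0:Int) < 5 by norm_num)]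
      rw [ih (i + 1) ((s0 + a) % 5) (s1) (s2) (s3) ((num * 2 + a) % 10)
          (resA ++ [decide ((num * 2 + a) % 10 % 5 = 0)])
          (by simp only [f0, f1, f2, f3, g0, g1, g2, g3]; omega)]
      have hb : (((s0 + a) % 5) * 1 + s1 * 3 + s2 * 4 + s3 * 2) % 5 = (num * 2 + a) % 10 % 5 := by omega
      rw [hb]
      simp
    · have hm : PySem.Int.mod i 4 = 1 := by
        rw [PySem.Int.mod_eq_emod_of_pos (show (0:Int) < 4 by norm_num)]; omega
      have e0 : PySem.Int.mod (i - 0) 4 = 1 := by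
        rw [PySem.Int.mod_eq_emod_of_pos (show (0:Int) < 4 by norm_num)]; omega
      have e1 : PySem.Int.mod (i - 1) 4 = 0 := by
        rw [PySem.Int.mod_eq_emod_of_pos (show (0:Int) < 4 by norm_num)]; omega
      have e2 : PySem.Int.mod (i - 2) 4 = 3 := by
        rw [PySem.Int.mod_eq_emod_of_pos (show (0:Int) < 4 by norm_num)]; omega
      have e3 : PySem.Int.mod (i - 3) 4 = 2 := by
        rw [PySem.Int.mod_eq_emod_of_pos (show (0:Int) < 4 by norm_num)]; omega
      have f0 : PySem.Int.mod (i + 1 - 0) 4 = 2 := by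
        rw [PySem.Int.mod_eq_emod_of_pos (show (0:Int) < 4 by norm_num)]; omega
      have f1 : PySem.Int.mod (i + 1 - 1) 4 = 1 := by
        rw [PySem.Int.mod_eq_emod_of_pos (show (0:Int) < 4 by norm_num)]; omega
      have f2 : PySem.Int.mod (i + 1 - 2) 4 = 0 := by
        rw [PySem.Int.mod_eq_emod_of_pos (show (0:Int) < 4 by norm_num)]; omega
      have f3 : PySem.Int.mod (i + 1 - 3) 4 = 3 := by
        rw [PySem.Int.mod_eq_emod_of_pos (show (0:Int) < 4 by norm_num)]; omega
      simp only [e0, e1, e2, e3, g0, g1, g2, g3] at hinv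
      rw [List.foldl_cons, pvStepA_eq]
      simp only [pvAltGo, hm, e0, e1, e2, e3, g0, g1, g2, g3, reduceIte, Int.reduceEq,
        PySem.Int.mod_eq_emod_of_pos (show (0:Int) < 5 by norm_num)]
      rw [ih (i + 1) (s0) ((s1 + a) % 5) (s2) (s3) ((num * 2 + a) % 10)
          (resA ++ [decide ((num * 2 + a) % 10 % 5 = 0)])
          (by simp only [f0, f1, f2, f3, g0, g1, g2, g3]; omega)]
      have hb : ((s0) * 2 + (s1 + a) % 5 * 1 + s2 * 3 + s3 * 4) % 5 = (num * 2 + a) % 10 % 5 := by omega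
      rw [hb]
      simp
    · have hm : PySem.Int.mod i 4 = 2 := by
        rw [PySem.Int.mod_eq_emod_of_pos (show (0:Int) < 4 by norm_num)]; omega
      have e0 : PySem.Int.mod (i - 0) 4 = 2 := by
        rw [PySem.Int.mod_eq_emod_of_pos (show (0:Int) < 4 by norm_num)]; omega
      have e1 : PySem.Int.mod (i - 1) 4 = 1 := by
        rw [PySem.Int.mod_eq_emod_of_pos (show (0:Int) < 4 by norm_num)]; omega
      have e2 : PySem.Int.mod (i - 2) 4 = 0 := by
        rw [PySem.Int.mod_eq_emod_of_pos (show (0:Int) < 4 by norm_num)]; omega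
      have e3 : PySem.Int.mod (i - 3) 4 = 3 := by
        rw [PySem.Int.mod_eq_emod_of_pos (show (0:Int) < 4 by norm_num)]; omega
      have f0 : PySem.Int.mod (i + 1 - 0) 4 = 3 := by
        rw [PySem.Int.mod_eq_emod_of_pos (show (0:Int) < 4 by norm_num)]; omega
      have f1 : PySem.Int.mod (i + 1 - 1) 4 = 2 := by
        rw [PySem.Int.mod_eq_emod_of_pos (show (0:Int) < 4 by norm_num)]; omega
      have f2 : PySem.Int.mod (i + 1 - 2) 4 = 1 := by
        rw [PySem.Int.mod_eq_emod_of_pos (show (0:Int) < 4 by norm_num)]; omega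
      have f3 : PySem.Int.mod (i + 1 - 3) 4 = 0 := by
        rw [PySem.Int.mod_eq_emod_of_pos (show (0:Int) < 4 by norm_num)]; omega
      simp only [e0, e1, e2, e3, g0, g1, g2, g3] at hinv
      rw [List.foldl_cons, pvStepA_eq]
      simp only [pvAltGo, hm, e0, e1, e2, e3, g0, g1, g2, g3, reduceIte, Int.reduceEq,
        PySem.Int.mod_eq_emod_of_pos (show (0:Int) < 5 by norm_num)]
      rw [ih (i + 1) (s0) (s1) ((s2 + a) % 5) (s3) ((num * 2 + a) % 10)
          (resA ++ [decide ((num * 2 + a) % 10 % 5 = 0)])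
          (by simp only [f0, f1, f2, f3, g0, g1, g2, g3]; omega)]
      have hb : ((s0) * 4 + s1 * 2 + (s2 + a) % 5 * 1 + s3 * 3) % 5 = (num * 2 + a) % 10 % 5 := by omega
      rw [hb]
      simp
    · have hm : PySem.Int.mod i 4 = 3 := by
        rw [PySem.Int.mod_eq_emod_of_pos (show (0:Int) < 4 by norm_num)]; omega
      have e0 : PySem.Int.mod (i - 0) 4 = 3 := by
        rw [PySem.Int.mod_eq_emod_of_pos (show (0:Int) < 4 by norm_num)]; omega
      have e1 : PySem.Int.mod (i - 1) 4 = 2 := by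
        rw [PySem.Int.mod_eq_emod_of_pos (show (0:Int) < 4 by norm_num)]; omega
      have e2 : PySem.Int.mod (i - 2) 4 = 1 := by
        rw [PySem.Int.mod_eq_emod_of_pos (show (0:Int) < 4 by norm_num)]; omega
      have e3 : PySem.Int.mod (i - 3) 4 = 0 := by
        rw [PySem.Int.mod_eq_emod_of_pos (show (0:Int) < 4 by norm_num)]; omega
      have f0 : PySem.Int.mod (i + 1 - 0) 4 = 0 := by
        rw [PySem.Int.mod_eq_emod_of_pos (show (0:Int) < 4 by norm_num)]; omega
      have f1 : PySem.Int.mod (i + 1 - 1) 4 = 3 := by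
        rw [PySem.Int.mod_eq_emod_of_pos (show (0:Int) < 4 by norm_num)]; omega
      have f2 : PySem.Int.mod (i + 1 - 2) 4 = 2 := by
        rw [PySem.Int.mod_eq_emod_of_pos (show (0:Int) < 4 by norm_num)]; omega
      have f3 : PySem.Int.mod (i + 1 - 3) 4 = 1 := by
        rw [PySem.Int.mod_eq_emod_of_pos (show (0:Int) < 4 by norm_num)]; omega
      simp only [e0, e1, e2, e3, g0, g1, g2, g3] at hinv
      rw [List.foldl_cons, pvStepA_eq]
      simp only [pvAltGo, hm, e0, e1, e2, e3, g0, g1, g2, g3, reduceIte, Int.reduceEq,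
        PySem.Int.mod_eq_emod_of_pos (show (0:Int) < 5 by norm_num)]
      rw [ih (i + 1) (s0) (s1) (s2) ((s3 + a) % 5) ((num * 2 + a) % 10)
          (resA ++ [decide ((num * 2 + a) % 10 % 5 = 0)])
          (by simp only [f0, f1, f2, f3, g0, g1, g2, g3]; omega)]
      have hb : ((s0) * 3 + s1 * 4 + s2 * 2 + (s3 + a) % 5 * 1) % 5 = (num * 2 + a) % 10 % 5 := by omega
      rw [hb]
      simp

-- ===== VERDICT (by name: the statement is the Claim_ definition above) =====
theorem prefixesDivBy51_spec : Claim_equal_prefixesDivBy51 := by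
  intro A _
  show prefixesDivBy51 A = prefixesDivBy51_alt A
  rw [pvA_eq_foldl]
  exact pvMain A 0 0 0 0 0 0 [] (by decide)
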